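-- pv_equiv track=rewrite | github.com/veerabadran28/sampleproject1 | main10.py | combine_and_match
-- ===== SOURCE A (Python) =====
-- def combine_and_match(tokens, columns):
--     combined_attributes = []
--     for i in range(len(tokens)):
--         for j in range(i + 1, len(tokens) + 1):
--             combined = ''.join(tokens[i:j]).lower()
--             if any(combined == col.lower() for col in columns):
--                 combined_attributes.append(combined)
--     return combined_attributes
-- ===== SOURCE B (Python) =====
-- def combine_and_match(tokens, columns):
--     # Character trie over the lowercased column names, index-encoded:
--     # children[n] maps a char to a child node index, end[n] marks a complete
--     # column name.  Each start position walks the trie token by token and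
--     # abandons the start as soon as the accumulated join leaves the trie,
--     # emitting the accumulated join at every end-marked token boundary.
--     children = [{}]
--     end = [False]
--     for col in columns:
--         n = 0
--         for ch in col.lower():
--             m = children[n].get(ch)
--             if m is None:
--                 m = len(children)
--                 children[n][ch] = m
--                 children.append({})
--                 end.append(False)
--             n = m
--         end[n] = True
--     out = []
--     suffix = tokens
--     while suffix:
--         n = 0
--         acc = ""
--         for t in suffix:
--             low = t.lower()
--             ok = True
--             for ch in low:
--                 m = children[n].get(ch)
--                 if m is None:
--                     ok = False
--                     break
--                 n = m
--             if not ok: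
--                 break
--             acc += low
--             if end[n]:
--                 out.append(acc)
--         suffix = suffix[1:]
--     return out
-- ===== Notes on version B (the rewrite author's own statement) =====
-- stated objective: faster
-- what changed: Replaces A's enumerate-every-(i,j)-slice, join it and linearly scan all columns per pair by building a character trie of the lowercased column names once and, from each start, walking the trie token by token with an incremental accumulator, abandoning a start as soon as the join leaves the trie and emitting at end-marked token boundaries.
import Mathlib
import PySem

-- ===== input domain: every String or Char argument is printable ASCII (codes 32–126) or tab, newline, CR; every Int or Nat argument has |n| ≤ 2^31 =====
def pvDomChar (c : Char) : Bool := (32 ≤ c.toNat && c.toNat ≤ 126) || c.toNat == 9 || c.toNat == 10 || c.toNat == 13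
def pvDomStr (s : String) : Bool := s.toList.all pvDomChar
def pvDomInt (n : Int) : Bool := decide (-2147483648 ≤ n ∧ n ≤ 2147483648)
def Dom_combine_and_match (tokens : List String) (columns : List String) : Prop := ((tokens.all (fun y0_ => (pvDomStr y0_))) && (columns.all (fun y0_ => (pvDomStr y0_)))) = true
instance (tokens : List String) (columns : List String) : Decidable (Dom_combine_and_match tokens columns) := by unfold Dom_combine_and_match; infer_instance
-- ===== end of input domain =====

-- B replaces A's slice-rejoin plus linear column scan per pair by a character trie
-- of the lowercased column names, walked token by token from each start (objective: faster).

-- ===== PORT A =====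
def combine_and_match (tokens : List String) (columns : List String) : List String :=
  (PySem.List.pyRange 0 (tokens.length : Int) 1).foldl (fun combined_attributes i =>
    (PySem.List.pyRange (i + 1) ((tokens.length : Int) + 1) 1).foldl (fun combined_attributes j =>
      let combined := PySem.Str.lower (PySem.Str.join "" (PySem.List.slice tokens (some i) (some j)))
      if columns.any (fun col => combined == PySem.Str.lower col) then
        combined_attributes ++ [combined]
      else combined_attributes) combined_attributes) []

-- ===== PORT B =====
-- trie build, inner 'for ch in col.lower()' loop of Source B; state (children, end, n)
-- (list indexing children[n] / end[n] is ported as getD/set: the indices Source B uses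
-- are always in range, as the proofs below establish)
def pvInsStep (st : List (PySem.Dict Char Nat) × List Bool × Nat) (c : Char) :
    List (PySem.Dict Char Nat) × List Bool × Nat :=
  match (st.1.getD st.2.2 PySem.Dict.empty).get? c with
  | some m => (st.1, st.2.1, m)
  | none =>
      let L := st.1.length
      (st.1.set st.2.2 ((st.1.getD st.2.2 PySem.Dict.empty).insert c L) ++ [PySem.Dict.empty],
       st.2.1 ++ [false], L)

-- one 'for col in columns' iteration of Source B
def pvInsertCol (ch : List (PySem.Dict Char Nat)) (en : List Bool) (col : String) :
    List (PySem.Dict Char Nat) × List Bool :=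
  let r := (PySem.Str.lower col).toList.foldl pvInsStep (ch, en, 0)
  (r.1, r.2.1.set r.2.2 true)

-- the whole trie-building loop of Source B
def pvBuild (columns : List String) : List (PySem.Dict Char Nat) × List Bool :=
  columns.foldl (fun st col => pvInsertCol st.1 st.2 col) ([PySem.Dict.empty], [false])

-- per-char walk: Source B's 'for ch in low' loop (none = the 'ok = False; break' path)
def pvWalk (ch : List (PySem.Dict Char Nat)) (n : Nat) : List Char → Option Nat
  | [] => some n
  | c :: cs =>
      match (ch.getD n PySem.Dict.empty).get? c with
      | some m => pvWalk ch m cs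
      | none => none

-- Source B's 'for t in suffix' loop; state (out, acc, n); stops at the first failing walk
def pvInnerB (ch : List (PySem.Dict Char Nat)) (en : List Bool)
    (out : List String) (acc : String) (n : Nat) : List String → List String
  | [] => out
  | t :: rest =>
      match pvWalk ch n (PySem.Str.lower t).toList with
      | none => out
      | some m =>
          let acc' := acc ++ PySem.Str.lower t
          pvInnerB ch en (if en.getD m false then out ++ [acc'] else out) acc' m rest

-- Source B's 'while suffix: … ; suffix = suffix[1:]' loop
def pvOuterB (ch : List (PySem.Dict Char Nat)) (en : List Bool)
    (out : List String) : List String → List String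
  | [] => out
  | t :: rest => pvOuterB ch en (pvInnerB ch en out "" 0 (t :: rest)) rest

def combine_and_match_alt (tokens : List String) (columns : List String) : List String :=
  let st := pvBuild columns
  pvOuterB st.1 st.2 [] tokens

-- ===== PRECONDITION & SPEC =====
def Spec_combine_and_match (tokens : List String) (columns : List String) (out : List String) : Prop := out = combine_and_match_alt tokens columns
instance (tokens : List String) (columns : List String) (out : List String) : Decidable (Spec_combine_and_match tokens columns out) := by unfold Spec_combine_and_match; infer_instance

-- ===== CLAIM (what is proved, stated in full; the proofs are below) =====
def Claim_equal_combine_and_match : Prop := ∀ (tokens : List String) (columns : List String), Dom_combine_and_match tokens columns → Spec_combine_and_match tokens columns (combine_and_match tokens columns)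

-- ===== LEMMAS AND PROOFS =====

-- the membership test A performs per candidate, as a predicate
def pvCondA (columns : List String) (s : String) : Bool :=
  columns.any (fun col => s == PySem.Str.lower col)

-- reference shape: matches produced from one start, prefix `pre` already accumulated
def pvRow (cond : String → Bool) (pre : String) : List String → List String
  | [] => []
  | t :: rest =>
      (if cond (pre ++ PySem.Str.lower t) then [pre ++ PySem.Str.lower t] else []) ++
        pvRow cond (pre ++ PySem.Str.lower t) rest

-- reference shape: all starts, in order
def pvRef (cond : String → Bool) : List String → List String
  | [] => []
  | t :: rest => pvRow cond "" (t :: rest) ++ pvRef cond rest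

-- acceptance by the trie: walk from the root, then the end flag
def pvAccT (ch : List (PySem.Dict Char Nat)) (en : List Bool) (s : List Char) : Bool :=
  match pvWalk ch 0 s with
  | some p => en.getD p false
  | none => false

-- trie invariant: lengths agree, root exists, edges stay in range, walk is injective
def pvInv (ch : List (PySem.Dict Char Nat)) (en : List Bool) : Prop :=
  ch.length = en.length ∧ 0 < ch.length ∧
  (∀ i c m, ((ch.getD i PySem.Dict.empty).get? c = some m) → m < ch.length) ∧
  (∀ s t p, pvWalk ch 0 s = some p → pvWalk ch 0 t = some p → s = t)

theorem pv_getD_append_left {α : Type} (l l' : List α) (n : Nat) (d : α) (h : n < l.length) :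
    (l ++ l').getD n d = l.getD n d := List.getD_append l l' d n h

theorem pv_getD_append_last {α : Type} (l : List α) (b d : α) :
    (l ++ [b]).getD l.length d = b := by
  simp [List.getD_eq_getElem?_getD]

theorem pv_getD_set {α : Type} (l : List α) (n j : Nat) (v d : α) :
    (l.set n v).getD j d = if j = n ∧ n < l.length then v else l.getD j d := by
  rw [List.getD_eq_getElem?_getD, List.getD_eq_getElem?_getD, List.getElem?_set]
  split_ifs with h1 h2 h2 <;> simp_all

-- getD of the updated children list (node n gains an edge, one node appended)
theorem pv_getD_upd (ch : List (PySem.Dict Char Nat)) (n : Nat) (d' : PySem.Dict Char Nat)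
    (hn : n < ch.length) (k : Nat) :
    (ch.set n d' ++ [PySem.Dict.empty]).getD k PySem.Dict.empty =
      if k = n then d' else if k = ch.length then PySem.Dict.empty
      else ch.getD k PySem.Dict.empty := by
  by_cases hk : k < ch.length
  · rw [pv_getD_append_left _ _ _ _ (by simpa using hk), pv_getD_set]
    split_ifs with h1 h2 h3 <;> simp_all
  · by_cases hkL : k = ch.length
    · have hlast : (ch.set n d' ++ [PySem.Dict.empty]).getD ch.length PySem.Dict.empty
          = PySem.Dict.empty := by
        have h := pv_getD_append_last (ch.set n d') PySem.Dict.empty PySem.Dict.empty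
        simpa using h
      subst hkL
      rw [hlast, if_neg (by omega), if_pos rfl]
    · rw [List.getD_eq_default _ _ (by simp; omega), List.getD_eq_default _ _ (by omega)]
      rw [if_neg (by omega), if_neg hkL]

theorem pv_walk_append (ch : List (PySem.Dict Char Nat)) (a b : List Char) :
    ∀ n, pvWalk ch n (a ++ b) = (pvWalk ch n a).bind (fun m => pvWalk ch m b) := by
  induction a with
  | nil => intro n; simp [pvWalk]
  | cons c cs ih =>
      intro n
      simp only [List.cons_append, pvWalk]
      cases hg : (ch.getD n PySem.Dict.empty).get? c <;> simp [ih]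

-- edges are only added, so successful walks survive the update
theorem pv_walk_up (ch : List (PySem.Dict Char Nat)) (n : Nat) (c : Char)
    (hn : n < ch.length) (hc : (ch.getD n PySem.Dict.empty).get? c = none) :
    ∀ (s : List Char) (k p : Nat), pvWalk ch k s = some p →
      pvWalk (ch.set n ((ch.getD n PySem.Dict.empty).insert c ch.length) ++ [PySem.Dict.empty])
        k s = some p := by
  intro s
  induction s with
  | nil => intro k p h; simpa [pvWalk] using h
  | cons c' cs ih =>
      intro k p h
      simp only [pvWalk] at h ⊢
      cases hg : (ch.getD k PySem.Dict.empty).get? c' with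
      | none => rw [hg] at h; cases h
      | some m =>
          rw [hg] at h
          have hk : k < ch.length := by
            by_contra hk
            rw [List.getD_eq_default _ _ (by omega)] at hg
            rw [PySem.Dict.get?_empty] at hg; cases hg
          rw [pv_getD_upd ch n _ hn k]
          by_cases hkn : k = n
          · have hcc : c' ≠ c := by
              rintro rfl
              rw [hkn] at hg; rw [hc] at hg; cases hg
            rw [if_pos hkn, PySem.Dict.get?_insert_of_ne _ _ hcc]
            rw [hkn] at hg; rw [hg]
            exact ih m p h
          · rw [if_neg hkn, if_neg (by omega : k ≠ ch.length), hg]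
            exact ih m p h

-- a walk succeeding in the updated trie either succeeded before, or ends at the new node
theorem pv_walk_down (ch : List (PySem.Dict Char Nat)) (n : Nat) (c : Char)
    (hE : ∀ i c m, ((ch.getD i PySem.Dict.empty).get? c = some m) → m < ch.length)
    (hn : n < ch.length) (hc : (ch.getD n PySem.Dict.empty).get? c = none) :
    ∀ (s : List Char) (k p : Nat), k < ch.length →
      pvWalk (ch.set n ((ch.getD n PySem.Dict.empty).insert c ch.length) ++ [PySem.Dict.empty])
        k s = some p →
      (pvWalk ch k s = some p ∧ p < ch.length) ∨
      (p = ch.length ∧ ∃ s1, s = s1 ++ [c] ∧ pvWalk ch k s1 = some n) := by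
  intro s
  induction s with
  | nil =>
      intro k p hk h
      simp only [pvWalk] at h
      cases h
      exact Or.inl ⟨rfl, hk⟩
  | cons c' cs ih =>
      intro k p hk h
      simp only [pvWalk] at h
      rw [pv_getD_upd ch n _ hn k] at h
      by_cases hkn : k = n
      · rw [if_pos hkn] at h
        by_cases hcc : c' = c
        · subst hcc
          rw [PySem.Dict.get?_insert_self] at h
          -- now at the fresh node, whose dict is empty
          cases cs with
          | nil =>
              simp only [pvWalk] at h
              cases h
              exact Or.inr ⟨rfl, [], rfl, by rw [hkn]; rfl⟩
          | cons c'' cs' =>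
              simp only [pvWalk] at h
              rw [pv_getD_upd ch n _ hn ch.length, if_neg (by omega), if_pos rfl,
                PySem.Dict.get?_empty] at h
              cases h
        · rw [PySem.Dict.get?_insert_of_ne _ _ hcc] at h
          cases hg : (ch.getD n PySem.Dict.empty).get? c' with
          | none => rw [hg] at h; cases h
          | some m =>
              rw [hg] at h
              rcases ih m p (hE n c' m hg) h with ⟨hw, hp⟩ | ⟨hp, s1, rfl, hw1⟩
              · refine Or.inl ⟨?_, hp⟩
                simp only [pvWalk]
                rw [hkn, hg]; exact hw
              · refine Or.inr ⟨hp, c' :: s1, rfl, ?_⟩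
                simp only [pvWalk]
                rw [hkn, hg]; exact hw1
      · rw [if_neg hkn, if_neg (by omega : k ≠ ch.length)] at h
        cases hg : (ch.getD k PySem.Dict.empty).get? c' with
        | none => rw [hg] at h; cases h
        | some m =>
            rw [hg] at h
            rcases ih m p (hE k c' m hg) h with ⟨hw, hp⟩ | ⟨hp, s1, rfl, hw1⟩
            · refine Or.inl ⟨?_, hp⟩
              simp only [pvWalk]
              rw [hg]; exact hw
            · refine Or.inr ⟨hp, c' :: s1, rfl, ?_⟩
              simp only [pvWalk]
              rw [hg]; exact hw1

-- one pvInsStep preserves the invariant, tracks the walked prefix, keeps acceptance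
theorem pv_step (ch : List (PySem.Dict Char Nat)) (en : List Bool) (n : Nat) (c : Char)
    (pre : List Char) (hInv : pvInv ch en) (hn : n < ch.length)
    (hw : pvWalk ch 0 pre = some n) :
    pvInv (pvInsStep (ch, en, n) c).1 (pvInsStep (ch, en, n) c).2.1 ∧
    (pvInsStep (ch, en, n) c).2.2 < (pvInsStep (ch, en, n) c).1.length ∧
    pvWalk (pvInsStep (ch, en, n) c).1 0 (pre ++ [c]) = some (pvInsStep (ch, en, n) c).2.2 ∧
    (∀ s, pvAccT (pvInsStep (ch, en, n) c).1 (pvInsStep (ch, en, n) c).2.1 s = pvAccT ch en s) := by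
  obtain ⟨hlen, hpos, hE, hInj⟩ := hInv
  cases hg : (ch.getD n PySem.Dict.empty).get? c with
  | some m =>
      have hstep : pvInsStep (ch, en, n) c = (ch, en, m) := by
        unfold pvInsStep; rw [hg]
      rw [hstep]
      refine ⟨⟨hlen, hpos, hE, hInj⟩, hE n c m hg, ?_, fun s => rfl⟩
      show pvWalk ch 0 (pre ++ [c]) = some m
      rw [pv_walk_append ch pre [c] 0, hw]
      show pvWalk ch n [c] = some m
      simp only [pvWalk]
      rw [hg]
  | none =>
      have hstep : pvInsStep (ch, en, n) c
          = (ch.set n ((ch.getD n PySem.Dict.empty).insert c ch.length) ++ [PySem.Dict.empty],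
             en ++ [false], ch.length) := by
        unfold pvInsStep; rw [hg]
      rw [hstep]
      have hlen' : (ch.set n ((ch.getD n PySem.Dict.empty).insert c ch.length)
          ++ [PySem.Dict.empty]).length = ch.length + 1 := by simp
      refine ⟨⟨?_, ?_, ?_, ?_⟩, ?_, ?_, ?_⟩
      · show _ = (en ++ [false]).length
        rw [hlen']; simp [hlen]
      · show 0 < _
        rw [hlen']; omega
      · -- edges stay in range
        intro i c'' m hgi
        show m < _
        rw [hlen']
        rw [pv_getD_upd ch n _ hn i] at hgi
        by_cases hin : i = n
        · rw [if_pos hin, PySem.Dict.get?_insert] at hgi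
          split_ifs at hgi with hcc
          · injection hgi with h; omega
          · have := hE n c'' m hgi; omega
        · rw [if_neg hin] at hgi
          by_cases hiL : i = ch.length
          · rw [if_pos hiL, PySem.Dict.get?_empty] at hgi; cases hgi
          · rw [if_neg hiL] at hgi
            have := hE i c'' m hgi; omega
      · -- the walk stays injective
        intro s t p hs ht
        rcases pv_walk_down ch n c hE hn hg s 0 p hpos hs with ⟨hs', hps⟩ | ⟨hps, s1, rfl, hs1⟩
        · rcases pv_walk_down ch n c hE hn hg t 0 p hpos ht with ⟨ht', _⟩ | ⟨hpt, _, _, _⟩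
          · exact hInj s t p hs' ht'
          · omega
        · rcases pv_walk_down ch n c hE hn hg t 0 p hpos ht with ⟨_, hpt⟩ | ⟨hpt, t1, rfl, ht1⟩
          · omega
          · rw [hInj s1 t1 n hs1 ht1]
      · show ch.length < _
        rw [hlen']; omega
      · -- the walked prefix extends into the new node
        show pvWalk _ 0 (pre ++ [c]) = some ch.length
        rw [pv_walk_append _ pre [c] 0, pv_walk_up ch n c hn hg pre 0 n hw]
        show pvWalk _ n [c] = some ch.length
        simp only [pvWalk]
        rw [pv_getD_upd ch n _ hn n, if_pos rfl, PySem.Dict.get?_insert_self]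
      · -- acceptance is unchanged
        intro s
        show pvAccT _ (en ++ [false]) s = _
        unfold pvAccT
        cases hs : pvWalk (ch.set n ((ch.getD n PySem.Dict.empty).insert c ch.length)
            ++ [PySem.Dict.empty]) 0 s with
        | none =>
            cases hso : pvWalk ch 0 s with
            | none => rfl
            | some q => rw [pv_walk_up ch n c hn hg s 0 q hso] at hs; cases hs
        | some p =>
            rcases pv_walk_down ch n c hE hn hg s 0 p hpos hs with ⟨hs', hp⟩ | ⟨hp, s1, rfl, hs1⟩
            · rw [hs']
              show (en ++ [false]).getD p false = en.getD p false
              exact pv_getD_append_left en [false] p false (by omega)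
            · have hold : pvWalk ch 0 (s1 ++ [c]) = none := by
                rw [pv_walk_append ch s1 [c] 0, hs1]
                show pvWalk ch n [c] = none
                simp only [pvWalk]
                rw [hg]
              rw [hold]
              show (en ++ [false]).getD p false = false
              rw [hp, hlen]
              exact pv_getD_append_last en false false

-- the char fold of pvInsertCol, with the same invariant
theorem pv_fold_inv (cs : List Char) :
    ∀ (ch : List (PySem.Dict Char Nat)) (en : List Bool) (n : Nat) (pre : List Char),
      pvInv ch en → n < ch.length → pvWalk ch 0 pre = some n →
      pvInv (cs.foldl pvInsStep (ch, en, n)).1 (cs.foldl pvInsStep (ch, en, n)).2.1 ∧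
      (cs.foldl pvInsStep (ch, en, n)).2.2 < (cs.foldl pvInsStep (ch, en, n)).1.length ∧
      pvWalk (cs.foldl pvInsStep (ch, en, n)).1 0 (pre ++ cs)
        = some (cs.foldl pvInsStep (ch, en, n)).2.2 ∧
      ∀ s, pvAccT (cs.foldl pvInsStep (ch, en, n)).1 (cs.foldl pvInsStep (ch, en, n)).2.1 s
        = pvAccT ch en s := by
  induction cs with
  | nil =>
      intro ch en n pre hInv hn hw
      exact ⟨hInv, hn, by simpa using hw, fun s => rfl⟩
  | cons c cs' ih =>
      intro ch en n pre hInv hn hw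
      obtain ⟨hI, hn', hw', hacc⟩ := pv_step ch en n c pre hInv hn hw
      have hfold : (c :: cs').foldl pvInsStep (ch, en, n)
          = cs'.foldl pvInsStep (pvInsStep (ch, en, n) c) := rfl
      have heta : pvInsStep (ch, en, n) c
          = ((pvInsStep (ch, en, n) c).1, (pvInsStep (ch, en, n) c).2.1,
             (pvInsStep (ch, en, n) c).2.2) := rfl
      rw [hfold, heta]
      obtain ⟨hI2, hn2, hw2, hacc2⟩ := ih _ _ _ (pre ++ [c]) hI hn' hw'
      refine ⟨hI2, hn2, ?_, fun s => (hacc2 s).trans (hacc s)⟩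
      rw [show pre ++ c :: cs' = pre ++ [c] ++ cs' from by simp]
      exact hw2

-- setting the end flag of the node a word reaches accepts exactly that word more
theorem pv_setEnd (ch : List (PySem.Dict Char Nat)) (en : List Bool) (n : Nat) (w : List Char)
    (hInv : pvInv ch en) (hn : n < ch.length) (hw : pvWalk ch 0 w = some n) (s : List Char) :
    pvAccT ch (en.set n true) s = ((s == w) || pvAccT ch en s) := by
  obtain ⟨hlen, _, _, hInj⟩ := hInv
  unfold pvAccT
  cases hs : pvWalk ch 0 s with
  | none =>
      have hsw : s ≠ w := by rintro rfl; rw [hs] at hw; cases hw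
      show false = ((s == w) || false)
      simp [hsw]
  | some p =>
      by_cases hpn : p = n
      · subst hpn
        have hse : s = w := hInj s w p hs hw
        show (en.set p true).getD p false = ((s == w) || en.getD p false)
        rw [pv_getD_set]
        have hpe : p < en.length := by omega
        simp [hse, hpe]
      · have hsw : s ≠ w := by
          rintro rfl
          rw [hs] at hw
          injection hw with h
          exact hpn h
        show (en.set n true).getD p false = ((s == w) || en.getD p false)
        rw [pv_getD_set]
        simp [hsw, hpn]

-- one column insertion: the invariant survives and exactly that word is added
theorem pv_insertCol (ch : List (PySem.Dict Char Nat)) (en : List Bool) (col : String)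
    (hInv : pvInv ch en) :
    pvInv (pvInsertCol ch en col).1 (pvInsertCol ch en col).2 ∧
    ∀ s, pvAccT (pvInsertCol ch en col).1 (pvInsertCol ch en col).2 s
      = ((s == (PySem.Str.lower col).toList) || pvAccT ch en s) := by
  obtain ⟨hR, hn2, hw2, hacc2⟩ :=
    pv_fold_inv (PySem.Str.lower col).toList ch en 0 [] hInv hInv.2.1 rfl
  rw [List.nil_append] at hw2
  unfold pvInsertCol
  constructor
  · obtain ⟨h1, h2, h3, h4⟩ := hR
    exact ⟨by simpa using h1, h2, h3, h4⟩
  · intro s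
    show pvAccT _ (List.set _ _ true) s = _
    rw [pv_setEnd _ _ _ _ hR hn2 hw2 s, hacc2 s]

-- the whole build loop, from any invariant state
theorem pv_build_go (cols : List String) :
    ∀ (st : List (PySem.Dict Char Nat) × List Bool), pvInv st.1 st.2 →
      pvInv (cols.foldl (fun st col => pvInsertCol st.1 st.2 col) st).1
            (cols.foldl (fun st col => pvInsertCol st.1 st.2 col) st).2 ∧
      ∀ s, pvAccT (cols.foldl (fun st col => pvInsertCol st.1 st.2 col) st).1
             (cols.foldl (fun st col => pvInsertCol st.1 st.2 col) st).2 s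
        = (cols.any (fun col => s == (PySem.Str.lower col).toList) || pvAccT st.1 st.2 s) := by
  induction cols with
  | nil => intro st hInv; exact ⟨hInv, fun s => by simp⟩
  | cons col rest ih =>
      intro st hInv
      obtain ⟨hI, hacc⟩ := pv_insertCol st.1 st.2 col hInv
      simp only [List.foldl_cons]
      obtain ⟨hI2, hacc2⟩ := ih (pvInsertCol st.1 st.2 col) hI
      refine ⟨hI2, fun s => ?_⟩
      rw [hacc2 s, hacc s]
      simp [List.any_cons, Bool.or_comm, Bool.or_assoc]

-- the built trie accepts exactly the lowercased column names
theorem pv_build (columns : List String) (s : List Char) :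
    pvAccT (pvBuild columns).1 (pvBuild columns).2 s
      = columns.any (fun col => s == (PySem.Str.lower col).toList) := by
  have hInv0 : pvInv [PySem.Dict.empty] [false] := by
    refine ⟨rfl, by decide, ?_, ?_⟩
    · intro i c m hgi
      exfalso
      have : ([PySem.Dict.empty] : List (PySem.Dict Char Nat)).getD i PySem.Dict.empty
          = PySem.Dict.empty := by
        cases i with
        | zero => rfl
        | succ j => rw [List.getD_eq_default _ _ (by simp)]
      rw [this, PySem.Dict.get?_empty] at hgi
      cases hgi
    · intro s t p hs ht
      have hnil : ∀ u : List Char, pvWalk [PySem.Dict.empty] 0 u = some p → u = [] := by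
        intro u hu
        cases u with
        | nil => rfl
        | cons c cs =>
            simp only [pvWalk] at hu
            rw [show ([PySem.Dict.empty] : List (PySem.Dict Char Nat)).getD 0 PySem.Dict.empty
                = PySem.Dict.empty from rfl, PySem.Dict.get?_empty] at hu
            cases hu
      rw [hnil s hs, hnil t ht]
  have hacc0 : ∀ u, pvAccT [PySem.Dict.empty] [false] u = false := by
    intro u
    cases u with
    | nil => rfl
    | cons c cs =>
        unfold pvAccT
        simp only [pvWalk]
        rw [show ([PySem.Dict.empty] : List (PySem.Dict Char Nat)).getD 0 PySem.Dict.empty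
            = PySem.Dict.empty from rfl, PySem.Dict.get?_empty]
  obtain ⟨_, hacc⟩ := pv_build_go columns ([PySem.Dict.empty], [false]) hInv0
  rw [show pvBuild columns
      = columns.foldl (fun st col => pvInsertCol st.1 st.2 col) ([PySem.Dict.empty], [false])
      from rfl]
  rw [hacc s, hacc0 s, Bool.or_false]

-- String equality is List Char equality
theorem pv_beq_toList (s t : String) : (s == t) = (s.toList == t.toList) := by
  by_cases h : s = t
  · subst h; simp
  · have h' : s.toList ≠ t.toList := fun hl => h (String.toList_inj.mp hl)
    simp [h, h']

-- a start whose accumulated prefix left the trie produces nothing more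
theorem pv_row_dead (ch : List (PySem.Dict Char Nat)) (en : List Bool) :
    ∀ (ts : List String) (pre : String), pvWalk ch 0 pre.toList = none →
      pvRow (fun s => pvAccT ch en s.toList) pre ts = [] := by
  intro ts
  induction ts with
  | nil => intro pre _; rfl
  | cons t rest ih =>
      intro pre hd
      have hdead : pvWalk ch 0 (pre ++ PySem.Str.lower t).toList = none := by
        rw [String.toList_append, pv_walk_append ch _ _ 0, hd]
        rfl
      have hcf : pvAccT ch en (pre ++ PySem.Str.lower t).toList = false := by
        unfold pvAccT; rw [hdead]
      simp only [String.toList_append, PySem.Str.toList_lower] at hcf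
      simp [pvRow, hcf, ih _ hdead]

-- Source B's token loop from one start produces exactly one pvRow
theorem pv_innerB_eq (ch : List (PySem.Dict Char Nat)) (en : List Bool) :
    ∀ (ts : List String) (out : List String) (acc : String) (n : Nat),
      pvWalk ch 0 acc.toList = some n →
      pvInnerB ch en out acc n ts = out ++ pvRow (fun s => pvAccT ch en s.toList) acc ts := by
  intro ts
  induction ts with
  | nil => intro out acc n _; simp [pvInnerB, pvRow]
  | cons t rest ih =>
      intro out acc n hacc
      have happ : pvWalk ch 0 (acc ++ PySem.Str.lower t).toList
          = pvWalk ch n (PySem.Str.lower t).toList := by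
        rw [String.toList_append, pv_walk_append ch _ _ 0, hacc]
        rfl
      simp only [pvInnerB]
      cases hg : pvWalk ch n (PySem.Str.lower t).toList with
      | none =>
          have hcond : pvAccT ch en (acc ++ PySem.Str.lower t).toList = false := by
            unfold pvAccT; rw [happ, hg]
          have hdead := pv_row_dead ch en rest (acc ++ PySem.Str.lower t) (by rw [happ, hg])
          simp only [String.toList_append, PySem.Str.toList_lower] at hcond
          show out = out ++ _
          simp [pvRow, hcond, hdead]
      | some m =>
          have hcond : pvAccT ch en (acc ++ PySem.Str.lower t).toList = en.getD m false := by
            unfold pvAccT; rw [happ, hg]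
          simp only [String.toList_append, PySem.Str.toList_lower] at hcond
          show pvInnerB ch en (if en.getD m false then out ++ [acc ++ PySem.Str.lower t] else out)
              (acc ++ PySem.Str.lower t) m rest = _
          rw [ih _ _ m (by rw [happ, hg])]
          cases hEnd : en.getD m false <;>
            rw [hEnd] at hcond <;> simp [pvRow, hcond]

-- Source B's suffix loop produces pvRef
theorem pv_outerB_eq (ch : List (PySem.Dict Char Nat)) (en : List Bool) :
    ∀ (ts : List String) (out : List String),
      pvOuterB ch en out ts = out ++ pvRef (fun s => pvAccT ch en s.toList) ts := by
  intro ts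
  induction ts with
  | nil => intro out; simp [pvOuterB, pvRef]
  | cons t rest ih =>
      intro out
      show pvOuterB ch en (pvInnerB ch en out "" 0 (t :: rest)) rest = _
      rw [ih, pv_innerB_eq ch en (t :: rest) out "" 0 rfl]
      simp [pvRef]

theorem pv_B_eq (tokens columns : List String) :
    combine_and_match_alt tokens columns = pvRef (pvCondA columns) tokens := by
  show pvOuterB (pvBuild columns).1 (pvBuild columns).2 [] tokens = _
  rw [pv_outerB_eq _ _ tokens []]
  have hcond : (fun s => pvAccT (pvBuild columns).1 (pvBuild columns).2 s.toList)
      = pvCondA columns := by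
    funext s
    rw [pv_build columns s.toList]
    unfold pvCondA
    simp only [pv_beq_toList]
  rw [hcond, List.nil_append]

-- lowercasing a join, token by token
theorem pv_lower_join_nil :
    PySem.Str.lower (PySem.Str.join "" ([] : List String)) = "" := by
  apply String.toList_inj.mp
  simp [PySem.Str.toList_lower, PySem.Str.toList_join, PySem.Chars.join_nil]
  rfl

theorem pv_lower_join_cons (t : String) (ts : List String) :
    PySem.Str.lower (PySem.Str.join "" (t :: ts)) =
      PySem.Str.lower t ++ PySem.Str.lower (PySem.Str.join "" ts) := by
  apply String.toList_inj.mp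
  cases ts with
  | nil =>
      simp [PySem.Str.toList_lower, PySem.Str.toList_join, PySem.Chars.join_singleton,
        PySem.Chars.join_nil, String.toList_append]
      rfl
  | cons u rest =>
      simp only [PySem.Str.toList_lower, PySem.Str.toList_join, String.toList_append,
        List.map_cons, PySem.Chars.join_cons_cons]
      show PySem.Chars.lower _ = _
      have : PySem.Chars.lower = List.map PySem.Chars.lowerChar := rfl
      simp [this]

-- A's inner loop, normalized to Nat ranges, produces a pvRow
theorem pv_row_spec (cond : String → Bool) (ts : List String) :
    ∀ (pre : String) (acc : List String),
      (List.range ts.length).foldl (fun acc m =>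
          if cond (pre ++ PySem.Str.lower (PySem.Str.join "" (ts.take (m + 1)))) then
            acc ++ [pre ++ PySem.Str.lower (PySem.Str.join "" (ts.take (m + 1)))]
          else acc) acc
        = acc ++ pvRow cond pre ts := by
  induction ts with
  | nil => intro pre acc; simp [pvRow]
  | cons t rest ih =>
      intro pre acc
      rw [List.length_cons, List.range_succ_eq_map]
      simp only [List.foldl_cons, List.foldl_map, List.take_succ_cons, Nat.succ_eq_add_one,
        List.take_zero, pv_lower_join_cons, pv_lower_join_nil, String.append_empty,
        ← String.append_assoc]
      rw [ih]
      simp only [pvRow]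
      split_ifs with h <;> simp

theorem pv_outer_spec (cond : String → Bool) (ts : List String) :
    ∀ (acc : List String),
      (List.range ts.length).foldl (fun acc k =>
          (List.range (ts.length - k)).foldl (fun acc m =>
              if cond (PySem.Str.lower (PySem.Str.join "" ((ts.drop k).take (m + 1)))) then
                acc ++ [PySem.Str.lower (PySem.Str.join "" ((ts.drop k).take (m + 1)))]
              else acc) acc) acc
        = acc ++ pvRef cond ts := by
  induction ts with
  | nil => intro acc; simp [pvRef]
  | cons t rest ih =>
      intro acc
      rw [List.length_cons, List.range_succ_eq_map]
      simp only [List.foldl_cons, List.foldl_map, Nat.succ_eq_add_one, Nat.add_sub_add_right,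
        List.drop_zero, Nat.sub_zero, List.drop_succ_cons]
      rw [ih]
      have hrow : (List.range (t :: rest).length).foldl (fun acc m =>
          if cond (PySem.Str.lower (PySem.Str.join "" ((t :: rest).take (m + 1)))) then
            acc ++ [PySem.Str.lower (PySem.Str.join "" ((t :: rest).take (m + 1)))]
          else acc) acc = acc ++ pvRow cond "" (t :: rest) := by
        have hbody : (fun (acc : List String) (m : Nat) =>
            if cond (PySem.Str.lower (PySem.Str.join "" ((t :: rest).take (m + 1)))) then
              acc ++ [PySem.Str.lower (PySem.Str.join "" ((t :: rest).take (m + 1)))]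
            else acc)
          = (fun (acc : List String) (m : Nat) =>
            if cond ("" ++ PySem.Str.lower (PySem.Str.join "" ((t :: rest).take (m + 1)))) then
              acc ++ ["" ++ PySem.Str.lower (PySem.Str.join "" ((t :: rest).take (m + 1)))]
            else acc) := by
          funext a m; rw [String.empty_append]
        rw [hbody, pv_row_spec]
      rw [List.length_cons] at hrow
      rw [hrow]
      simp [pvRef]

-- index-cast helper for the inner range length of A
theorem pv_toNat_shift (n k : Nat) : (((n : Int) + 1) - ((k : Int) + 1)).toNat = n - k := by
  omega

-- slice with the index shapes A's loops produce
theorem pv_slice_take (xs : List String) (k m : Nat) :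
    PySem.List.slice xs (some (k : Int)) (some ((k : Int) + 1 + (m : Int)))
      = (xs.drop k).take (m + 1) := by
  have h := PySem.List.slice_natCast xs k (k + 1 + m)
  have hcast : ((k + 1 + m : Nat) : Int) = (k : Int) + 1 + (m : Int) := by push_cast; ring
  rw [hcast] at h
  rw [h]
  congr 1
  omega

theorem pv_A_eq (tokens columns : List String) :
    combine_and_match tokens columns = pvRef (pvCondA columns) tokens := by
  unfold combine_and_match
  simp only [PySem.List.pyRange_one, Int.sub_zero, Int.toNat_natCast, List.foldl_map,
    zero_add, pv_toNat_shift, pv_slice_take]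
  have := pv_outer_spec (pvCondA columns) tokens []
  simp only [List.nil_append] at this
  rw [← this]
  rfl

-- ===== VERDICT (by name: the statement is the Claim_ definition above) =====
theorem combine_and_match_spec : Claim_equal_combine_and_match := by
  intro tokens columns _
  unfold Spec_combine_and_match
  rw [pv_A_eq, pv_B_eq]
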